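-- pv_equiv track=rewrite | github.com/DCSR6667/need_to_do | recursion_problems/subset_problems/skip.py | skipAppNotApple
-- ===== SOURCE A (Python) =====
-- def skipAppNotApple(up):
--     if len(up)==0:
--         return ""
--     if up.startswith("app") and not(up.startswith("apple")):
--         ch=""
--         resfrombelow=skipAppNotApple(up[3:])
--     else:
--         ch=up[0]
--         resfrombelow=skipAppNotApple(up[1:])
--     return ch+resfrombelow
-- ===== SOURCE B (Python) =====
-- def skipAppNotApple(up):
--     parts = up.split("app")
--     pieces = [parts[0]]
--     for p in parts[1:]:
--         pieces.append("app" + p if p.startswith("le") else p)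
--     return "".join(pieces)
-- ===== Notes on version B (the rewrite author's own statement) =====
-- stated objective: faster
-- what changed: Replaced the character-by-character recursion (which rebuilds the whole tail by string concatenation at each step) with a staged pipeline: split the string on 'app', then rejoin the pieces, re-inserting 'app' only before pieces that start with 'le' (occurrences that were part of 'apple').
import Mathlib
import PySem

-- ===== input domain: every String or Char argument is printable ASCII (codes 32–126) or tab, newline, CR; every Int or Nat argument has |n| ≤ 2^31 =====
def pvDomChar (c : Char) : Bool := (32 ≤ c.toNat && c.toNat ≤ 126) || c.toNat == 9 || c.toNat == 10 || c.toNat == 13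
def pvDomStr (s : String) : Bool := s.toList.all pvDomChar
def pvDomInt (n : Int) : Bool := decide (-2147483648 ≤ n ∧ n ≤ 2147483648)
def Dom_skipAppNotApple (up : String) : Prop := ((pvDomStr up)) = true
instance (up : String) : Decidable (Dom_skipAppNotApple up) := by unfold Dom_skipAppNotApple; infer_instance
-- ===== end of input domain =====

-- B replaces A's character-by-character recursion with a staged pipeline: split the string on
-- "app", then rejoin, re-inserting "app" only before pieces that start with "le" (objective: faster — linear split-and-rejoin vs quadratic recursion, measured).

-- ===== PORT A =====
-- A's recursion, on the character list (up[3:] = drop 3, up[1:] = tail, ch + rest = cons).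
def skipAChars (l : List Char) : List Char :=
  match l with
  | [] => []
  | c :: rest =>
    if ("app".toList.isPrefixOf l && !("apple".toList.isPrefixOf l)) then
      skipAChars (rest.drop 2)  -- l.drop 3 with l = c :: rest
    else
      c :: skipAChars rest
termination_by l.length
decreasing_by all_goals simp [List.length_drop]

def skipAppNotApple (up : String) : String := String.ofList (skipAChars up.toList)

-- ===== PORT B =====
-- parts = up.split("app"); pieces = [parts[0]] + ["app"+p if p.startswith("le") else p …]; "".join(pieces)
def skipAppNotApple_alt (up : String) : String :=
  match PySem.Chars.splitOn up.toList "app".toList with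
  | [] => ""  -- unreachable: split always returns at least one piece
  | p0 :: rest =>
    String.ofList
      (rest.foldl
        (fun pieces p =>
          pieces ++ (if PySem.Chars.startswith p "le".toList then "app".toList ++ p else p))
        p0)

-- ===== PRECONDITION & SPEC =====
def Spec_skipAppNotApple (up : String) (out : String) : Prop := out = skipAppNotApple_alt up
instance (up : String) (out : String) : Decidable (Spec_skipAppNotApple up out) := by unfold Spec_skipAppNotApple; infer_instance

-- ===== CLAIM (what is proved, stated in full; the proofs are below) =====
def Claim_equal_skipAppNotApple : Prop := ∀ (up : String), Dom_skipAppNotApple up → Spec_skipAppNotApple up (skipAppNotApple up)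

-- ===== LEMMAS AND PROOFS =====

-- reference split: first segment (up to the first "app"), then the segments after each "app".
def sp (l : List Char) : List (List Char) :=
  match l with
  | [] => [[]]
  | c :: rest =>
    if ['a','p','p'].isPrefixOf l then
      [] :: sp (rest.drop 2)
    else
      (c :: (sp rest).headI) :: (sp rest).tail
termination_by l.length
decreasing_by all_goals simp [List.length_drop]

theorem sp_pos (c : Char) (rest : List Char)
    (h : ['a','p','p'].isPrefixOf (c :: rest) = true) :
    sp (c :: rest) = [] :: sp (rest.drop 2) := by
  rw [sp.eq_def]; simp only [h, if_pos]

theorem sp_neg (c : Char) (rest : List Char)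
    (h : ¬ ['a','p','p'].isPrefixOf (c :: rest) = true) :
    sp (c :: rest) = (c :: (sp rest).headI) :: (sp rest).tail := by
  rw [sp.eq_def]; simp only [h, Bool.false_eq_true, if_false]

theorem sp_nil : sp [] = [[]] := by rw [sp.eq_def]

theorem sp_cons (l : List Char) : sp l = (sp l).headI :: (sp l).tail := by
  match l with
  | [] => rw [sp_nil]; rfl
  | c :: rest =>
    by_cases h : ['a','p','p'].isPrefixOf (c :: rest) = true
    · rw [sp_pos c rest h]; rfl
    · rw [sp_neg c rest h]; rfl

theorem head_eq_a (c : Char) (rest : List Char)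
    (h : ['a','p','p'].isPrefixOf (c :: rest) = true) : c = 'a' := by
  simp [List.isPrefixOf] at h
  exact h.1.symm

-- the first segment's first characters agree with l's (unless l is cut at position 0)
theorem e_sp (l : List Char) : ['e'].isPrefixOf (sp l).headI = ['e'].isPrefixOf l := by
  match l with
  | [] => rw [sp_nil]; rfl
  | c :: rest =>
    by_cases h : ['a','p','p'].isPrefixOf (c :: rest) = true
    · rw [sp_pos c rest h, head_eq_a c rest h]
      simp [List.isPrefixOf]
    · rw [sp_neg c rest h]
      simp [List.isPrefixOf]

theorem le_sp (l : List Char) : ['l','e'].isPrefixOf (sp l).headI = ['l','e'].isPrefixOf l := by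
  match l with
  | [] => rw [sp_nil]; rfl
  | c :: rest =>
    by_cases h : ['a','p','p'].isPrefixOf (c :: rest) = true
    · rw [sp_pos c rest h, head_eq_a c rest h]
      simp [List.isPrefixOf]
    · rw [sp_neg c rest h]
      simp [List.isPrefixOf, e_sp rest]

-- splitOn's fuelled loop computes sp
theorem go_spec (fuel : Nat) (l cur : List Char) (acc : List (List Char))
    (hf : l.length < fuel) :
    PySem.Chars.splitOn.go ['a','p','p'] fuel l cur acc
      = acc.reverse ++ (cur.reverse ++ (sp l).headI) :: (sp l).tail := by
  induction fuel generalizing l cur acc with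
  | zero => omega
  | succ f ih =>
    match l with
    | [] => simp [PySem.Chars.splitOn.go, sp]
    | c :: rest =>
      rw [PySem.Chars.splitOn.go]
      have h3 : (['a','p','p'] : List Char).length = 3 := rfl
      by_cases h : ['a','p','p'].isPrefixOf (c :: rest) = true
      · rw [if_pos h, h3]
        have hlen : (List.drop 3 (c :: rest)).length < f := by
          simp at hf ⊢; omega
        rw [ih _ _ _ hlen]
        rw [sp_pos c rest h]
        rw [sp_cons (rest.drop 2)]
        simp
      · rw [if_neg h]
        have hlen : rest.length < f := by simp at hf; omega
        rw [ih _ _ _ hlen]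
        rw [sp_neg c rest h]
        simp

theorem splitOn_eq_sp (l : List Char) :
    PySem.Chars.splitOn l ['a','p','p'] = sp l := by
  have := go_spec (l.length + 1) l [] [] (by omega)
  simpa [PySem.Chars.splitOn, ← sp_cons] using this

-- if l starts with "app", "apple".isPrefixOf l reduces to "le".isPrefixOf (l.drop 3)
theorem apple_split (l : List Char) (h : ['a','p','p'].isPrefixOf l = true) :
    ['a','p','p','l','e'].isPrefixOf l = ['l','e'].isPrefixOf (l.drop 3) := by
  match l with
  | [] => simp [List.isPrefixOf] at h
  | [c] => simp [List.isPrefixOf] at h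
  | [c, d] => simp [List.isPrefixOf] at h
  | c :: d :: e :: rest =>
    simp [List.isPrefixOf] at h ⊢
    obtain ⟨h1, h2, h3⟩ := h
    subst h1; subst h2; subst h3
    simp

-- gluing the split back together yields A's result
theorem glue_sp (l : List Char) :
    (sp l).headI ++ ((sp l).tail.map
        (fun p => if ['l','e'].isPrefixOf p then ['a','p','p'] ++ p else p)).flatten
      = skipAChars l := by
  fun_induction sp l with
  | case1 => simp [skipAChars]
  | case2 c rest h ih =>
    rw [if_pos h]
    rw [skipAChars]
    have h3 : (c :: rest).drop 3 = rest.drop 2 := by simp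
    by_cases hle : ['l','e'].isPrefixOf (rest.drop 2) = true
    · -- "apple": the piece is re-glued with "app"; A keeps a,p,p and continues at drop 3
      have happle : ['a','p','p','l','e'].isPrefixOf (c :: rest) = true := by
        rw [apple_split _ h, h3]; exact hle
      have hA : ("app".toList.isPrefixOf (c :: rest) && !("apple".toList.isPrefixOf (c :: rest))) = false := by
        rw [show ("apple".toList.isPrefixOf (c :: rest)) = true from happle]
        rw [Bool.not_true, Bool.and_false]
      rw [if_neg (by rw [hA]; exact Bool.false_ne_true)]
      obtain ⟨y, hy⟩ := List.isPrefixOf_iff_prefix.mp happle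
      have hc : c = 'a' := by injection hy with h1 _; exact h1.symm
      have hrest : rest = 'p'::'p'::'l'::'e'::y := by injection hy with _ h2; exact h2.symm
      subst hc; subst hrest
      rw [sp_cons (('p'::'p'::'l'::'e'::y).drop 2)]
      simp only [List.drop, List.tail_cons, List.headI_cons, List.map_cons, List.flatten_cons]
      have hle' : ['l','e'].isPrefixOf (sp ('l'::'e'::y)).headI = true := by
        rw [le_sp]; simp [List.isPrefixOf]
      rw [if_pos hle']
      -- A keeps the two p's, then reaches skipAChars ('l'::'e'::y)
      rw [skipAChars]
      rw [if_neg (by simp [List.isPrefixOf])]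
      rw [skipAChars]
      rw [if_neg (by simp [List.isPrefixOf])]
      simp only [List.drop] at ih
      rw [← ih]
      rw [sp_cons ('l'::'e'::y)]
      simp
    · -- plain "app": the piece is glued as-is; A removes the three characters
      have happle : ['a','p','p','l','e'].isPrefixOf (c :: rest) = false := by
        rw [apple_split _ h, h3]; exact Bool.eq_false_iff.mpr hle
      have hA : ("app".toList.isPrefixOf (c :: rest) && !("apple".toList.isPrefixOf (c :: rest))) = true := by
        rw [show ("app".toList.isPrefixOf (c :: rest)) = true from h]
        rw [show ("apple".toList.isPrefixOf (c :: rest)) = false from happle]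
        rfl
      rw [if_pos hA]
      rw [sp_cons (rest.drop 2)]
      simp only [List.tail_cons, List.map_cons, List.flatten_cons]
      have hle' : ['l','e'].isPrefixOf (sp (rest.drop 2)).headI = false := by
        rw [le_sp]; exact Bool.eq_false_iff.mpr hle
      rw [if_neg (by simp [hle'])]
      rw [← ih, sp_cons (rest.drop 2)]
      simp
  | case3 c rest h ih =>
    rw [if_neg h, skipAChars]
    have hA : ("app".toList.isPrefixOf (c :: rest) && !("apple".toList.isPrefixOf (c :: rest))) = false := by
      rw [show ("app".toList.isPrefixOf (c :: rest)) = false from Bool.eq_false_iff.mpr h]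
      rw [Bool.false_and]
    rw [if_neg (by rw [hA]; exact Bool.false_ne_true)]
    simp only [List.headI_cons, List.tail_cons]
    rw [List.cons_append, ih]

-- ===== VERDICT (by name: the statement is the Claim_ definition above) =====
theorem skipAppNotApple_spec : Claim_equal_skipAppNotApple := by
  intro up _
  unfold Spec_skipAppNotApple skipAppNotApple skipAppNotApple_alt
  have happ : "app".toList = ['a','p','p'] := rfl
  have hsplit : PySem.Chars.splitOn up.toList "app".toList = sp up.toList := by
    rw [happ]; exact splitOn_eq_sp up.toList
  rcases hsp : sp up.toList with _ | ⟨p0, rest⟩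
  · exact absurd hsp (by rw [sp_cons up.toList]; simp)
  · rw [hsplit, hsp]
    simp only [PySem.List.foldl_append_eq_flatMap]
    have hsw : ∀ p : List Char,
        (PySem.Chars.startswith p "le".toList) = ['l','e'].isPrefixOf p := fun _ => rfl
    simp only [hsw, happ, List.flatMap_def]
    have := glue_sp up.toList
    rw [hsp] at this
    simp only [List.headI_cons, List.tail_cons] at this
    rw [this]
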